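-- pv_equiv track=rewrite | github.com/jamesjiang52/Advent-of-Code-2018 | Days/Day 5 - Alchemical Reduction/Part 2.py | length_reduced
-- ===== SOURCE A (Python) =====
-- def length_reduced(string_list):
--     continue_ = True
--
--     while continue_:
--         continue_ = False
--
--         i = 0
--         while i < len(string_list) - 1:
--             if string_list[i].islower():
--                 if string_list[i + 1] == string_list[i].upper():
--                     del string_list[i:i + 2]
--                     continue_ = True
--                 else:
--                     i += 1
--             else:
--                 if string_list[i + 1] == string_list[i].lower():
--                     del string_list[i:i + 2]
--                     continue_ = True
--                 else:
--                     i += 1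
--
--     return len(string_list)
-- ===== SOURCE B (Python) =====
-- def length_reduced(string_list):
--     stack = []
--     for s in string_list:
--         if stack and s == (stack[-1].upper() if stack[-1].islower() else stack[-1].lower()):
--             stack.pop()
--         else:
--             stack.append(s)
--     return len(stack)
-- ===== Notes on version B (the rewrite author's own statement) =====
-- stated objective: faster
-- what changed: Replaced A's repeated full rescans with in-place quadratic deletions by a single left-to-right pass over a stack that pops when the new element annihilates the top; B also does not mutate its argument while A empties it.
-- outside the precondition, e.g. on length_reduced(['ab', 'Ab', 'a', 'A', 'ab', 'AB']): A returns 2, B returns 0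
import Mathlib
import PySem

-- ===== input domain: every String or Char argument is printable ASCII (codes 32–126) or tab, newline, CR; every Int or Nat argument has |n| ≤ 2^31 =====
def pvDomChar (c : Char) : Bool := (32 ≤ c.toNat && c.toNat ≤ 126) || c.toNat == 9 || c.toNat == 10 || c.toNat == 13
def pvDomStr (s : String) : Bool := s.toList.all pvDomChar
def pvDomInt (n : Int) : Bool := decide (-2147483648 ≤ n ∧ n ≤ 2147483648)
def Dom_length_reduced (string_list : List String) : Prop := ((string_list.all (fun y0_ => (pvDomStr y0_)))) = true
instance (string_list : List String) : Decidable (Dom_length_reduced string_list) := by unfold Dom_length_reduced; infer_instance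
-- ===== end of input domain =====

-- B replaces A's repeated full rescans with quadratic in-place deletions by one linear stack pass (pop when the
-- new element annihilates the top). Equivalence is about the RETURN value only: A empties its argument in place, B does not.

-- ===== PORT A =====
-- Python str.islower(): at least one cased character and no uppercase one (hand-ported — PySem has no
-- string-level islower; exact on the ASCII domain, where cased = alphabetic)
def pyStrIslower (s : String) : Bool :=
  s.toList.any (fun c => PySem.Chars.isalpha c) && s.toList.all (fun c => !(PySem.Chars.isupper c))

-- del string_list[i:i+2]
def pvDelPair (l : List String) (i : Nat) : List String := l.take i ++ l.drop (i + 2)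

-- inner `while i < len(string_list) - 1` loop of A (indexing is always in range under the guard;
-- `fuel` is only a totality guard: one unit per loop iteration, and fuel = len(list) always suffices,
-- since the measure len(list) - i drops on every iteration)
def pvInnerA (fuel : Nat) (l : List String) (i : Nat) (changed : Bool) : List String × Bool :=
  match fuel with
  | 0 => (l, changed)
  | f + 1 =>
    if i + 1 < l.length then
      if pyStrIslower (l.getD i "") then
        if l.getD (i + 1) "" = PySem.Str.upper (l.getD i "") then
          pvInnerA f (pvDelPair l i) i true
        else
          pvInnerA f l (i + 1) changed
      else
        if l.getD (i + 1) "" = PySem.Str.lower (l.getD i "") then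
          pvInnerA f (pvDelPair l i) i true
        else
          pvInnerA f l (i + 1) changed
    else (l, changed)

-- outer `while continue_` loop of A (fuel again a totality guard: every pass that reports a change
-- shortens the list, so len(list) + 1 passes always suffice)
def pvOuterA (fuel : Nat) (l : List String) : List String :=
  match fuel with
  | 0 => l
  | f + 1 =>
    if (pvInnerA l.length l 0 false).2 then pvOuterA f (pvInnerA l.length l 0 false).1
    else (pvInnerA l.length l 0 false).1

def length_reduced (string_list : List String) : Int :=
  ((pvOuterA (string_list.length + 1) string_list).length : Int)

-- ===== PORT B =====
-- `stack[-1].upper() if stack[-1].islower() else stack[-1].lower()` — the partner the top annihilates with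
def pvPartner (s : String) : String :=
  if pyStrIslower s then PySem.Str.upper s else PySem.Str.lower s

def pvStep (st : List String) (s : String) : List String :=
  match st with
  | [] => [s]
  | t :: rest => if s = pvPartner t then rest else s :: t :: rest

def length_reduced_alt (string_list : List String) : Int :=
  ((string_list.foldl pvStep []).length : Int)

-- ===== PRECONDITION & SPEC =====
-- Pre_ excludes lists containing a mixed-case element (a string with both an uppercase and a lowercase letter,
-- e.g. "Ab"): there the annihilation relation is not symmetric, so the fully-reduced length depends on the
-- deletion order, and A's multi-pass order and B's stack order are equally defensible but can disagree.
def Pre_length_reduced (string_list : List String) : Prop :=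
  ∀ s ∈ string_list, PySem.Str.lower s = s ∨ PySem.Str.upper s = s
instance (string_list : List String) : Decidable (Pre_length_reduced string_list) := by
  unfold Pre_length_reduced; infer_instance

def pvWitness_length_reduced : List String := ["x y", "a", "b", "B", "A", " 7 "]

def Spec_length_reduced (string_list : List String) (out : Int) : Prop := out = length_reduced_alt string_list
instance (string_list : List String) (out : Int) : Decidable (Spec_length_reduced string_list out) := by unfold Spec_length_reduced; infer_instance

-- ===== CLAIM (what is proved, stated in full; the proofs are below) =====
def Claim_equal_length_reduced : Prop := ∀ (string_list : List String), Dom_length_reduced string_list → Pre_length_reduced string_list → Spec_length_reduced string_list (length_reduced string_list)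

-- ===== LEMMAS AND PROOFS =====

-- Char-level facts about PySem's ASCII case maps
theorem pvLeToNat (a b : Char) : a ≤ b ↔ a.toNat ≤ b.toNat := by
  rw [Char.le_def, UInt32.le_iff_toNat_le]; rfl

theorem pvCharExt (a b : Char) (h : a.toNat = b.toNat) : a = b := by
  apply Char.ext; exact UInt32.toNat_inj.mp h

theorem pvLow_iff (c : Char) : PySem.Chars.islower c = true ↔ 97 ≤ c.toNat ∧ c.toNat ≤ 122 := by
  simp [PySem.Chars.islower, pvLeToNat]

theorem pvUp_iff (c : Char) : PySem.Chars.isupper c = true ↔ 65 ≤ c.toNat ∧ c.toNat ≤ 90 := by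
  simp [PySem.Chars.isupper, pvLeToNat]

theorem pvToNat_ofNat (n : Nat) (h : n < 55296) : (Char.ofNat n).toNat = n := by
  rw [Char.toNat_ofNat, if_pos]; exact Or.inl h

theorem pvUcNat (c : Char) (h : PySem.Chars.islower c = true) :
    (PySem.Chars.upperChar c).toNat = c.toNat - 32 := by
  have hb := (pvLow_iff c).mp h
  simp only [PySem.Chars.upperChar, h, if_true]
  exact pvToNat_ofNat _ (by omega)

theorem pvLcNat (c : Char) (h : PySem.Chars.isupper c = true) :
    (PySem.Chars.lowerChar c).toNat = c.toNat + 32 := by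
  have hb := (pvUp_iff c).mp h
  simp only [PySem.Chars.lowerChar, h, if_true]
  exact pvToNat_ofNat _ (by omega)

theorem pvUcId (c : Char) (h : PySem.Chars.islower c = false) : PySem.Chars.upperChar c = c := by
  simp [PySem.Chars.upperChar, h]

theorem pvLcId (c : Char) (h : PySem.Chars.isupper c = false) : PySem.Chars.lowerChar c = c := by
  simp [PySem.Chars.lowerChar, h]

theorem pvC3 (c : Char) (h : PySem.Chars.islower c = true) :
    PySem.Chars.isupper (PySem.Chars.upperChar c) = true := by
  have h1 := pvUcNat c h
  have hb := (pvLow_iff c).mp h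
  rw [pvUp_iff]; omega

theorem pvC4 (c : Char) (h : PySem.Chars.isupper c = true) :
    PySem.Chars.islower (PySem.Chars.lowerChar c) = true := by
  have h1 := pvLcNat c h
  have hb := (pvUp_iff c).mp h
  rw [pvLow_iff]; omega

theorem pvC1 (c : Char) (h : PySem.Chars.isupper c = false) :
    PySem.Chars.lowerChar (PySem.Chars.upperChar c) = c := by
  by_cases hl : PySem.Chars.islower c = true
  · have hb := (pvLow_iff c).mp hl
    apply pvCharExt
    rw [pvLcNat _ (pvC3 c hl), pvUcNat c hl]
    omega
  · rw [pvUcId c (by simpa using hl), pvLcId c h]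

theorem pvC2 (c : Char) (h : PySem.Chars.islower c = false) :
    PySem.Chars.upperChar (PySem.Chars.lowerChar c) = c := by
  by_cases hu : PySem.Chars.isupper c = true
  · have hb := (pvUp_iff c).mp hu
    apply pvCharExt
    rw [pvUcNat _ (pvC4 c hu), pvLcNat c hu]
    omega
  · rw [pvLcId c (by simpa using hu), pvUcId c h]

theorem pvC5 (c : Char) : PySem.Chars.isupper (PySem.Chars.lowerChar c) = false := by
  by_cases hu : PySem.Chars.isupper c = true
  · have h1 := pvLcNat c hu
    have hb := (pvUp_iff c).mp hu
    simp only [Bool.eq_false_iff, Ne, pvUp_iff]; omega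
  · rw [pvLcId c (by simpa using hu)]; simpa using hu

theorem pvC6 (c : Char) (h : PySem.Chars.islower c = true) : PySem.Chars.upperChar c ≠ c := by
  have h1 := pvUcNat c h
  have hb := (pvLow_iff c).mp h
  intro he
  rw [he] at h1
  omega

theorem pvC7 (c : Char) (h : PySem.Chars.lowerChar c ≠ c) : PySem.Chars.isupper c = true := by
  by_contra hu
  exact h (pvLcId c (by simpa using hu))

theorem pvMapId (l : List Char) (f : Char → Char) (h : ∀ x ∈ l, f x = x) : l.map f = l := by
  induction l with
  | nil => rfl
  | cons a t ih => simp [h a (by simp), ih (fun x hx => h x (by simp [hx]))]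

theorem pvMapIdRev (l : List Char) (f : Char → Char) (h : l.map f = l) : ∀ x ∈ l, f x = x := by
  induction l with
  | nil => simp
  | cons a t ih =>
    simp only [List.map_cons, List.cons.injEq] at h
    intro x hx
    rcases List.mem_cons.mp hx with rfl | hxt
    · exact h.1
    · exact ih h.2 x hxt

-- on single-case strings (Pre_), pvPartner is an involution
theorem pv_pp (s : String) (h : PySem.Str.lower s = s ∨ PySem.Str.upper s = s) :
    pvPartner (pvPartner s) = s := by
  by_cases hl : pyStrIslower s = true
  · obtain ⟨hany, hall⟩ := by simpa [pyStrIslower, List.any_eq_true, List.all_eq_true] using hl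
    obtain ⟨c0, hc0m, hc0a⟩ := hany
    have hc0l : PySem.Chars.islower c0 = true := by
      have hfa := hall c0 hc0m
      simp only [PySem.Chars.isalpha, Bool.or_eq_true] at hc0a
      exact hc0a.resolve_left (by simp [hfa])
    have h2 : pyStrIslower (PySem.Str.upper s) = false := by
      simp only [pyStrIslower, Bool.and_eq_false_iff]
      right
      rw [List.all_eq_false]
      refine ⟨PySem.Chars.upperChar c0, ?_, ?_⟩
      · rw [PySem.Str.toList_upper, PySem.Chars.upper]; exact List.mem_map_of_mem hc0m
      · simp [pvC3 c0 hc0l]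
    have h3 : PySem.Str.lower (PySem.Str.upper s) = s := by
      rw [← String.toList_inj, PySem.Str.toList_lower, PySem.Str.toList_upper,
        PySem.Chars.lower, PySem.Chars.upper, List.map_map]
      exact pvMapId _ _ (fun c hc => pvC1 c (hall c hc))
    simp [pvPartner, hl, h2, h3]
  · by_cases hlow : PySem.Str.lower s = s
    · simp [pvPartner, hl, hlow]
    · have hup : PySem.Str.upper s = s := h.resolve_left hlow
      have hfix : ∀ c ∈ s.toList, PySem.Chars.upperChar c = c := by
        have hmap : s.toList.map PySem.Chars.upperChar = s.toList := by
          conv_rhs => rw [← congrArg String.toList hup]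
          rw [PySem.Str.toList_upper, PySem.Chars.upper]
        exact pvMapIdRev _ _ hmap
      have hnl : ∀ c ∈ s.toList, PySem.Chars.islower c = false := by
        intro c hc
        by_contra hcl
        exact pvC6 c (by simpa using hcl) (hfix c hc)
      obtain ⟨c0, hc0m, hc0ne⟩ : ∃ c ∈ s.toList, PySem.Chars.lowerChar c ≠ c := by
        by_contra hno
        push_neg at hno
        apply hlow
        rw [← String.toList_inj, PySem.Str.toList_lower, PySem.Chars.lower]
        exact pvMapId _ _ hno
      have hc0u : PySem.Chars.isupper c0 = true := pvC7 c0 hc0ne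
      have h2 : pyStrIslower (PySem.Str.lower s) = true := by
        simp only [pyStrIslower, Bool.and_eq_true, List.any_eq_true, List.all_eq_true]
        constructor
        · refine ⟨PySem.Chars.lowerChar c0, ?_, ?_⟩
          · rw [PySem.Str.toList_lower, PySem.Chars.lower]; exact List.mem_map_of_mem hc0m
          · simp [PySem.Chars.isalpha, pvC4 c0 hc0u]
        · intro c hc
          rw [PySem.Str.toList_lower, PySem.Chars.lower] at hc
          obtain ⟨d, _hdm, rfl⟩ := List.mem_map.mp hc
          simp [pvC5 d]
      have h3 : PySem.Str.upper (PySem.Str.lower s) = s := by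
        rw [← String.toList_inj, PySem.Str.toList_upper, PySem.Str.toList_lower,
          PySem.Chars.upper, PySem.Chars.lower, List.map_map]
        exact pvMapId _ _ (fun c hc => pvC2 c (hnl c hc))
      simp [pvPartner, hl, h2, h3]

-- the stack never holds an adjacent annihilating pair
def pvStRed (st : List String) : Prop := st.IsChain (fun a b => a ≠ pvPartner b)

theorem pv_step_red (st : List String) (x : String) (hred : pvStRed st) :
    pvStRed (pvStep st x) := by
  match st with
  | [] => simp [pvStep, pvStRed]
  | t :: rest =>
    have hred' : List.IsChain (fun a b => a ≠ pvPartner b) (t :: rest) := hred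
    by_cases hc : x = pvPartner t
    · have he : pvStep (t :: rest) x = rest := by simp [pvStep, hc]
      rw [pvStRed, he]
      exact hred'.tail
    · have he : pvStep (t :: rest) x = x :: t :: rest := by simp [pvStep, hc]
      rw [pvStRed, he]
      exact List.isChain_cons_cons.mpr ⟨hc, hred'⟩

theorem pv_step_good (st : List String) (x : String)
    (hgood : ∀ s ∈ st, PySem.Str.lower s = s ∨ PySem.Str.upper s = s)
    (hx : PySem.Str.lower x = x ∨ PySem.Str.upper x = x) :
    ∀ s ∈ pvStep st x, PySem.Str.lower s = s ∨ PySem.Str.upper s = s := by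
  match st with
  | [] => simpa [pvStep] using hx
  | t :: rest =>
    by_cases hc : x = pvPartner t
    · have he : pvStep (t :: rest) x = rest := by simp [pvStep, hc]
      rw [he]
      exact fun s hs => hgood s (List.mem_cons_of_mem _ hs)
    · have he : pvStep (t :: rest) x = x :: t :: rest := by simp [pvStep, hc]
      rw [he]
      intro s hs
      rcases List.mem_cons.mp hs with rfl | hs'
      · exact hx
      · exact hgood s hs'

theorem pv_step_inv (st : List String) (x : String)
    (hred : pvStRed st) (hgood : ∀ s ∈ st, PySem.Str.lower s = s ∨ PySem.Str.upper s = s)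
    (_hx : PySem.Str.lower x = x ∨ PySem.Str.upper x = x) :
    pvStep (pvStep st x) (pvPartner x) = st := by
  match st with
  | [] => simp [pvStep]
  | t :: rest =>
    by_cases hpt : x = pvPartner t
    · have ht : pvPartner x = t := by rw [hpt, pv_pp t (hgood t (by simp))]
      have he : pvStep (t :: rest) x = rest := by simp [pvStep, hpt]
      rw [he]
      match rest with
      | [] => simp [pvStep, ht]
      | u :: rs =>
        have hred' : List.IsChain (fun a b => a ≠ pvPartner b) (t :: u :: rs) := hred
        have htu : t ≠ pvPartner u := (List.isChain_cons_cons.mp hred').1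
        have hne : pvPartner x ≠ pvPartner u := by rw [ht]; exact htu
        have he2 : pvStep (u :: rs) (pvPartner x) = pvPartner x :: u :: rs := by
          simp [pvStep, hne]
        rw [he2, ht]
    · have he : pvStep (t :: rest) x = x :: t :: rest := by simp [pvStep, hpt]
      rw [he]
      simp [pvStep]

theorem pv_fold_red_good (u : List String) (st : List String)
    (hred : pvStRed st) (hgood : ∀ s ∈ st, PySem.Str.lower s = s ∨ PySem.Str.upper s = s)
    (hu : ∀ s ∈ u, PySem.Str.lower s = s ∨ PySem.Str.upper s = s) :
    pvStRed (u.foldl pvStep st) ∧ ∀ s ∈ u.foldl pvStep st, PySem.Str.lower s = s ∨ PySem.Str.upper s = s := by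
  induction u generalizing st with
  | nil => exact ⟨hred, hgood⟩
  | cons a t ih =>
    simp only [List.foldl_cons]
    exact ih (pvStep st a) (pv_step_red st a hred) (pv_step_good st a hgood (hu a (by simp)))
      (fun s hs => hu s (List.mem_cons_of_mem _ hs))

-- deleting an adjacent annihilating pair does not change the stack result
theorem pv_fold_del (u v : List String) (x : String)
    (hu : ∀ s ∈ u, PySem.Str.lower s = s ∨ PySem.Str.upper s = s)
    (hx : PySem.Str.lower x = x ∨ PySem.Str.upper x = x) :
    ((u ++ [x, pvPartner x] ++ v).foldl pvStep []) = ((u ++ v).foldl pvStep []) := by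
  obtain ⟨hr, hg⟩ := pv_fold_red_good u [] (by simp [pvStRed]) (by simp) hu
  rw [List.foldl_append, List.foldl_append, List.foldl_append]
  congr 1
  simp only [List.foldl_cons, List.foldl_nil]
  exact pv_step_inv _ x hr hg hx

-- l splits around the adjacent pair at i
theorem pvDecomp (l : List String) (i : Nat) (h : i + 1 < l.length) :
    l = l.take i ++ [l.getD i "", l.getD (i + 1) ""] ++ l.drop (i + 2) := by
  conv_lhs => rw [← List.take_append_drop i l]
  rw [List.drop_eq_getElem_cons (by omega : i < l.length)]
  rw [List.drop_eq_getElem_cons (by omega : i + 1 < l.length)]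
  rw [List.getD_eq_getElem l "" (by omega : i < l.length),
    List.getD_eq_getElem l "" (by omega : i + 1 < l.length)]
  simp


-- one unfolding step of the inner loop
theorem pvInnerA_succ (f : Nat) (l : List String) (i : Nat) (c : Bool) :
    pvInnerA (f + 1) l i c =
      if i + 1 < l.length then
        if pyStrIslower (l.getD i "") then
          if l.getD (i + 1) "" = PySem.Str.upper (l.getD i "") then
            pvInnerA f (pvDelPair l i) i true
          else
            pvInnerA f l (i + 1) c
        else
          if l.getD (i + 1) "" = PySem.Str.lower (l.getD i "") then
            pvInnerA f (pvDelPair l i) i true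
          else
            pvInnerA f l (i + 1) c
      else (l, c) := rfl

theorem pvDelPair_len (l : List String) (i : Nat) (h : i + 1 < l.length) :
    (pvDelPair l i).length + 2 = l.length := by
  simp only [pvDelPair, List.length_append, List.length_take, List.length_drop]; omega

theorem pvInnerA_len_le (f : Nat) (l : List String) (i : Nat) (c : Bool) :
    (pvInnerA f l i c).1.length ≤ l.length := by
  induction f generalizing l i c with
  | zero => exact le_refl _
  | succ f ih =>
    rw [pvInnerA_succ]
    split_ifs with h1 h2 h3 h4
    · have := pvDelPair_len l i h1
      have := ih (pvDelPair l i) i true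
      omega
    · exact ih l (i + 1) c
    · have := pvDelPair_len l i h1
      have := ih (pvDelPair l i) i true
      omega
    · exact ih l (i + 1) c
    · exact le_refl _

theorem pvInnerA_len_lt (f : Nat) (l : List String) (i : Nat) (c : Bool)
    (h2 : (pvInnerA f l i c).2 = true) : c = true ∨ (pvInnerA f l i c).1.length < l.length := by
  induction f generalizing l i c with
  | zero => exact Or.inl h2
  | succ f ih =>
    rw [pvInnerA_succ] at h2 ⊢
    split_ifs at h2 ⊢ with h1 hb hc hd
    · have := pvDelPair_len l i h1
      have := pvInnerA_len_le f (pvDelPair l i) i true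
      exact Or.inr (by omega)
    · exact ih l (i + 1) c h2
    · have := pvDelPair_len l i h1
      have := pvInnerA_len_le f (pvDelPair l i) i true
      exact Or.inr (by omega)
    · exact ih l (i + 1) c h2
    · exact Or.inl h2

theorem pvDelPair_pre (l : List String) (i : Nat) (hl : Pre_length_reduced l) :
    Pre_length_reduced (pvDelPair l i) := by
  intro s hs
  rcases List.mem_append.mp hs with h | h
  · exact hl s (List.mem_of_mem_take h)
  · exact hl s (List.mem_of_mem_drop h)

-- the deleted pair folds away (shared by both deletion branches of the pass lemma)
theorem pvDelFold (l : List String) (i : Nat) (h : i + 1 < l.length)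
    (hl : Pre_length_reduced l)
    (hpart : l.getD (i + 1) "" = pvPartner (l.getD i "")) :
    (pvDelPair l i).foldl pvStep [] = l.foldl pvStep [] := by
  have hx : PySem.Str.lower (l.getD i "") = l.getD i "" ∨ PySem.Str.upper (l.getD i "") = l.getD i "" := by
    apply hl
    rw [List.getD_eq_getElem l "" (by omega : i < l.length)]
    exact List.getElem_mem _
  conv_rhs => rw [pvDecomp l i h]
  rw [hpart, pv_fold_del _ _ _ (fun s hs => hl s (List.mem_of_mem_take hs)) hx]
  rfl

-- each pass of A preserves the stack result and Pre_
theorem pvInnerA_fold (f : Nat) (l : List String) (i : Nat) (c : Bool) (hl : Pre_length_reduced l) :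
    ((pvInnerA f l i c).1.foldl pvStep []) = (l.foldl pvStep []) ∧ Pre_length_reduced (pvInnerA f l i c).1 := by
  induction f generalizing l i c with
  | zero => exact ⟨rfl, hl⟩
  | succ f ih =>
    rw [pvInnerA_succ]
    split_ifs with h1 ha hb hc
    · obtain ⟨hr1, hr2⟩ := ih (pvDelPair l i) i true (pvDelPair_pre l i hl)
      exact ⟨hr1.trans (pvDelFold l i h1 hl (by rw [pvPartner, if_pos ha]; exact hb)), hr2⟩
    · exact ih l (i + 1) c hl
    · obtain ⟨hr1, hr2⟩ := ih (pvDelPair l i) i true (pvDelPair_pre l i hl)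
      exact ⟨hr1.trans (pvDelFold l i h1 hl (by rw [pvPartner, if_neg ha]; exact hc)), hr2⟩
    · exact ih l (i + 1) c hl
    · exact ⟨rfl, hl⟩

theorem pvInnerA_changed (f : Nat) (l : List String) (i : Nat) :
    (pvInnerA f l i true).2 = true := by
  induction f generalizing l i with
  | zero => rfl
  | succ f ih =>
    rw [pvInnerA_succ]
    split_ifs with h1 ha hb hc
    · exact ih (pvDelPair l i) i
    · exact ih l (i + 1)
    · exact ih (pvDelPair l i) i
    · exact ih l (i + 1)
    · rfl

-- if a pass (run with enough fuel) reports no change, the list is unchanged and reduced from index i on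
theorem pvInnerA_nochange (f : Nat) (l : List String) (i : Nat) (c : Bool)
    (hf : l.length ≤ f + i + 1) (h : (pvInnerA f l i c).2 = false) :
    (pvInnerA f l i c).1 = l ∧
      ∀ j, i ≤ j → j + 1 < l.length → l.getD (j + 1) "" ≠ pvPartner (l.getD j "") := by
  induction f generalizing l i c with
  | zero =>
    exact ⟨rfl, fun j hij hjl => absurd hjl (by omega)⟩
  | succ f ih =>
    rw [pvInnerA_succ] at h ⊢
    split_ifs at h ⊢ with h1 ha hb hc hd
    · rw [pvInnerA_changed] at h; simp at h
    · obtain ⟨hr1, hr2⟩ := ih l (i + 1) c (by omega) h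
      refine ⟨hr1, fun j hij hjl => ?_⟩
      rcases Nat.eq_or_lt_of_le hij with rfl | hlt
      · rw [pvPartner, if_pos ha]; exact hb
      · exact hr2 j hlt hjl
    · rw [pvInnerA_changed] at h; simp at h
    · obtain ⟨hr1, hr2⟩ := ih l (i + 1) c (by omega) h
      refine ⟨hr1, fun j hij hjl => ?_⟩
      rcases Nat.eq_or_lt_of_le hij with rfl | hlt
      · rw [pvPartner, if_neg ha]; exact hc
      · exact hr2 j hlt hjl
    · exact ⟨rfl, fun j hij hjl => absurd hjl (by omega)⟩

theorem pvOuterA_spec (f : Nat) (l : List String) (hf : l.length < f) (hl : Pre_length_reduced l) :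
    ((pvOuterA f l).foldl pvStep []) = (l.foldl pvStep []) ∧
      (pvOuterA f l).IsChain (fun a b => b ≠ pvPartner a) := by
  induction f generalizing l with
  | zero => omega
  | succ f ih =>
    have hstep : pvOuterA (f + 1) l =
        if (pvInnerA l.length l 0 false).2 then pvOuterA f (pvInnerA l.length l 0 false).1
        else (pvInnerA l.length l 0 false).1 := rfl
    obtain ⟨hfold, hpre⟩ := pvInnerA_fold l.length l 0 false hl
    by_cases hch : (pvInnerA l.length l 0 false).2 = true
    · rw [hstep, if_pos hch]
      have hlt : (pvInnerA l.length l 0 false).1.length < l.length :=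
        (pvInnerA_len_lt l.length l 0 false hch).resolve_left (by simp)
      obtain ⟨h1, h2⟩ := ih (pvInnerA l.length l 0 false).1 (by omega) hpre
      exact ⟨h1.trans hfold, h2⟩
    · rw [hstep, if_neg hch]
      obtain ⟨heq, hred⟩ := pvInnerA_nochange l.length l 0 false (by omega)
        (by simpa using hch)
      rw [heq]
      refine ⟨rfl, ?_⟩
      rw [List.isChain_iff_getElem]
      intro j hj
      have hr := hred j (Nat.zero_le j) hj
      rwa [List.getD_eq_getElem l "" (by omega : j + 1 < l.length),
        List.getD_eq_getElem l "" (by omega : j < l.length)] at hr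

-- folding a fully-reduced list only pushes: the stack is its reversal
theorem pv_fold_reduced (m : List String) (st : List String)
    (hm : m.IsChain (fun a b => b ≠ pvPartner a))
    (hlink : ∀ t ∈ st.head?, ∀ h ∈ m.head?, h ≠ pvPartner t) :
    m.foldl pvStep st = m.reverse ++ st := by
  induction m generalizing st with
  | nil => simp
  | cons a t ih =>
    have hstep : pvStep st a = a :: st := by
      match st with
      | [] => rfl
      | b :: bs =>
        rw [pvStep, if_neg]
        exact hlink b (by simp) a (by simp)
    simp only [List.foldl_cons, hstep]
    have hlink2 : ∀ t' ∈ (a :: st).head?, ∀ h' ∈ t.head?, h' ≠ pvPartner t' := by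
      intro t' ht' h' hh'
      simp only [List.head?_cons, Option.mem_some_iff] at ht'
      subst ht'
      exact (List.isChain_cons.mp hm).1 h' hh'
    rw [ih (a :: st) hm.tail hlink2]
    simp

-- ===== VERDICT (by name: the statement is the Claim_ definition above) =====
theorem length_reduced_spec : Claim_equal_length_reduced := by
  intro l _hd hpre
  unfold Spec_length_reduced length_reduced length_reduced_alt
  obtain ⟨hfold, hred⟩ := pvOuterA_spec (l.length + 1) l (by omega) hpre
  have hrev := pv_fold_reduced (pvOuterA (l.length + 1) l) [] hred (by simp)
  rw [← hfold, hrev]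
  simp
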